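-- pv_equiv track=rewrite | github.com/ovidiu123/FIA-LABS | task3.py | order_values_lcv
-- ===== SOURCE A (Python) =====
-- from typing import Dict, List, Optional, Set, Tuple
--
-- Node = int
--
-- Color = str
--
-- def order_values_lcv(adj: Dict[Node, Set[Node]],
--                      var: Node,
--                      domains: Dict[Node, Set[Color]],
--                      assignment: Dict[Node, Color]) -> List[Color]:
--     """
--     Least Constraining Value: prefer colors that eliminate fewer options for neighbors.
--     (Optional but helps performance, still easy to explain.)
--     """
--     def impact(color: Color) -> int:
--         eliminated = 0
--         for nb in adj[var]:
--             if nb not in assignment and color in domains[nb]: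
--                 eliminated += 1
--         return eliminated
--
--     return sorted(domains[var], key=impact)
-- ===== SOURCE B (Python) =====
-- def order_values_lcv(adj, var, domains, assignment):
--     counts = {}
--     for nb in adj[var]:
--         if nb in assignment:
--             continue
--         for col in domains[nb]:
--             counts[col] = counts.get(col, 0) + 1
--     return sorted(domains[var], key=lambda c: counts.get(c, 0))
-- ===== Notes on version B (the rewrite author's own statement) =====
-- stated objective: alternative
-- what changed: Replaces A's per-color rescan of all neighbors (sorted's key calls impact, which loops over adj[var] for every color) with a single accumulation pass that builds a count table over the unassigned neighbors' domains, then sorts domains[var] by table lookups.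
-- outside the precondition, e.g. on order_values_lcv({}, 0, {0: set()}, {}): A returns [], B raises KeyError
import Mathlib
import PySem

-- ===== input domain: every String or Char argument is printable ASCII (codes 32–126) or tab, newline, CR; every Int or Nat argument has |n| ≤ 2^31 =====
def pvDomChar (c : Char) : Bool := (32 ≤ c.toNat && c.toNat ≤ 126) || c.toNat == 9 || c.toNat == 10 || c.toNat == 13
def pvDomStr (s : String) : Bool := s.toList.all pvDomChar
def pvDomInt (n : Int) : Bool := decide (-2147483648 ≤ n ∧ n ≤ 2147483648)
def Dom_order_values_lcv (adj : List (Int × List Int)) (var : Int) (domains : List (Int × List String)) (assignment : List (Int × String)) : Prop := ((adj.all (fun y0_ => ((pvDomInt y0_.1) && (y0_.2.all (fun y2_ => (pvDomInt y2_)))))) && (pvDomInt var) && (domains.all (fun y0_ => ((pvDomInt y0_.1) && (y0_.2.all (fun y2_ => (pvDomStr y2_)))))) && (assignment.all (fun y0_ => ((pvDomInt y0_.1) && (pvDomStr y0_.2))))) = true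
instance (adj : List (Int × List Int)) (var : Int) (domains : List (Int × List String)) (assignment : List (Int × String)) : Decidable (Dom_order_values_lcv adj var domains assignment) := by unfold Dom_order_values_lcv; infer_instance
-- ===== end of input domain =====

-- B builds a neighbor-domain count table in one accumulation pass and sorts domains[var] by
-- table lookups, instead of A's rescan of all neighbors for every color (alternative algorithm).


-- association-list (Python dict) lookup: first matching key
def pvLookup {ν : Type} (l : List (Int × ν)) (k : Int) : Option ν :=
  (l.find? (fun p => p.1 == k)).map (·.2)

-- ===== PORT A =====
-- impact(color): loop over adj[var], +1 for each unassigned neighbor whose domain contains color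
def pvImpact (adj : List (Int × List Int)) (var : Int) (domains : List (Int × List String)) (assignment : List (Int × String)) (color : String) : Int :=
  ((pvLookup adj var).getD []).foldl
    (fun eliminated nb =>
      if !(assignment.any (fun p => p.1 == nb)) && ((pvLookup domains nb).getD []).contains color
      then eliminated + 1 else eliminated) 0

def order_values_lcv (adj : List (Int × List Int)) (var : Int) (domains : List (Int × List String)) (assignment : List (Int × String)) : List String :=
  PySem.List.sorted ((pvLookup domains var).getD [])
    (fun c => pvImpact adj var domains assignment c) false

-- ===== PORT B =====
def order_values_lcv_alt (adj : List (Int × List Int)) (var : Int) (domains : List (Int × List String)) (assignment : List (Int × String)) : List String :=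
  let counts : PySem.Dict String Int :=
    ((pvLookup adj var).getD []).foldl
      (fun d nb =>
        if assignment.any (fun p => p.1 == nb) then d
        else ((pvLookup domains nb).getD []).foldl
          (fun d2 col => d2.insert col (d2.getD col 0 + 1)) d)
      PySem.Dict.empty
  PySem.List.sorted ((pvLookup domains var).getD []) (fun c => counts.getD c 0) false

-- ===== PRECONDITION & SPEC =====
-- Pre_ excludes (a) inputs where a needed dict key is missing (A raises KeyError, except the
-- degenerate corner domains[var] = ∅ with var ∉ adj, where A returns [] but B's natural upfront
-- adj[var] access raises), and (b) lists with duplicate colors in a domains value, which do not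
-- encode Python sets (there A's membership count and B's occurrence count legitimately differ).
def Pre_order_values_lcv (adj : List (Int × List Int)) (var : Int) (domains : List (Int × List String)) (assignment : List (Int × String)) : Prop :=
  (pvLookup adj var).isSome = true ∧ (pvLookup domains var).isSome = true ∧
  (∀ nb ∈ (pvLookup adj var).getD [],
      assignment.any (fun p => p.1 == nb) = false → (pvLookup domains nb).isSome = true) ∧
  (∀ kv ∈ domains, kv.2.Nodup)
instance (adj : List (Int × List Int)) (var : Int) (domains : List (Int × List String)) (assignment : List (Int × String)) : Decidable (Pre_order_values_lcv adj var domains assignment) := by unfold Pre_order_values_lcv; infer_instance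

def pvWitness_order_values_lcv : (List (Int × List Int)) × Int × (List (Int × List String)) × (List (Int × String)) :=
  ([(0, [1])], 0, [(0, ["a", "b"]), (1, ["a"])], [])

def Spec_order_values_lcv (adj : List (Int × List Int)) (var : Int) (domains : List (Int × List String)) (assignment : List (Int × String)) (out : List String) : Prop := out = order_values_lcv_alt adj var domains assignment
instance (adj : List (Int × List Int)) (var : Int) (domains : List (Int × List String)) (assignment : List (Int × String)) (out : List String) : Decidable (Spec_order_values_lcv adj var domains assignment out) := by unfold Spec_order_values_lcv; infer_instance

-- ===== CLAIM (what is proved, stated in full; the proofs are below) =====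
def Claim_equal_order_values_lcv : Prop := ∀ (adj : List (Int × List Int)) (var : Int) (domains : List (Int × List String)) (assignment : List (Int × String)), Dom_order_values_lcv adj var domains assignment → Pre_order_values_lcv adj var domains assignment → Spec_order_values_lcv adj var domains assignment (order_values_lcv adj var domains assignment)

-- ===== LEMMAS AND PROOFS =====

-- any value looked up in `domains` is duplicate-free when all of domains' values are
lemma lookup_nodup (domains : List (Int × List String)) (nb : Int)
    (hnd : ∀ kv ∈ domains, kv.2.Nodup) : ((pvLookup domains nb).getD []).Nodup := by
  unfold pvLookup
  cases h : domains.find? (fun p => p.1 == nb) with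
  | none => simp
  | some kv => simpa using hnd kv (List.mem_of_find?_eq_some h)

-- B's table lookup equals A's loop, for any neighbor list and any starting table/accumulator
lemma counts_getD_eq (domains : List (Int × List String)) (assignment : List (Int × String))
    (c : String) (hnd : ∀ kv ∈ domains, kv.2.Nodup) :
    ∀ (nbs : List Int) (d : PySem.Dict String Int),
      ((nbs.foldl
          (fun d nb =>
            if assignment.any (fun p => p.1 == nb) then d
            else ((pvLookup domains nb).getD []).foldl
              (fun d2 col => d2.insert col (d2.getD col 0 + 1)) d) d).getD c 0)
      = nbs.foldl
          (fun eliminated nb =>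
            if !(assignment.any (fun p => p.1 == nb)) && ((pvLookup domains nb).getD []).contains c
            then eliminated + 1 else eliminated) (d.getD c 0) := by
  intro nbs
  induction nbs with
  | nil => intro d; rfl
  | cons nb rest ih =>
    intro d
    simp only [List.foldl_cons]
    rw [ih]
    congr 1
    by_cases ha : assignment.any (fun p => p.1 == nb) = true
    · simp [ha]
    · simp only [Bool.not_eq_true] at ha
      rw [if_neg (by simp [ha]), PySem.Dict.getD_foldl_insert_add_one]
      by_cases hm : ((pvLookup domains nb).getD []).contains c = true
      · have hmem : c ∈ (pvLookup domains nb).getD [] := by simpa using hm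
        rw [if_pos (by simp [ha]; exact hmem)]
        have hc1 : ((pvLookup domains nb).getD []).count c = 1 :=
          List.count_eq_one_of_mem (lookup_nodup domains nb hnd) hmem
        rw [hc1]; push_cast; ring
      · have hmem : c ∉ (pvLookup domains nb).getD [] := by simpa using hm
        rw [if_neg (by simp [ha]; exact hmem)]
        have hc0 : ((pvLookup domains nb).getD []).count c = 0 :=
          List.count_eq_zero_of_not_mem hmem
        simp [hc0]

-- ===== VERDICT (by name: the statement is the Claim_ definition above) =====
theorem order_values_lcv_spec : Claim_equal_order_values_lcv := by
  intro adj var domains assignment _hdom hpre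
  unfold Spec_order_values_lcv order_values_lcv order_values_lcv_alt
  congr 1
  funext c
  rw [counts_getD_eq domains assignment c hpre.2.2.2]
  rfl
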